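-- pv_equiv track=rewrite | github.com/VITA-Group/VideoLifter | render_co3d.py | find_closest_numbers
-- ===== SOURCE A (Python) =====
-- def find_closest_numbers(numbers, target):
--     # Sort the list
--     sorted_numbers = sorted(numbers)
--
--     # Initialize variables to store the closest numbers
--     smaller = None
--     larger = None
--
--     # Traverse through the sorted list to find the closest larger number
--     for number in sorted_numbers:
--         if number > target:
--             larger = number
--             break
--
--     # Find the closest smaller number
--     if sorted_numbers.index(larger) > 0:
--         smaller = sorted_numbers[sorted_numbers.index(larger) - 1]
--
--     return smaller, larger
-- ===== SOURCE B (Python) =====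
-- def find_closest_numbers(numbers, target):
--     # One linear pass: keep the largest value <= target and the smallest value > target.
--     smaller = None
--     larger = None
--     for x in numbers:
--         if x > target:
--             if larger is None or x < larger:
--                 larger = x
--         else:
--             if smaller is None or x > smaller:
--                 smaller = x
--     return smaller, larger
-- ===== Notes on version B (the rewrite author's own statement) =====
-- stated objective: alternative
-- what changed: Replaces sort + linear scan + two list.index passes with a single unsorted pass keeping the running max of values <= target and the running min of values > target (O(n) vs O(n log n), though CPython's C sorted keeps A's constant low).
-- crash fix: When no element of numbers exceeds target (including the empty list) A raises ValueError from sorted_numbers.index(None); B returns (max of values <= target or None, None). — e.g. on find_closest_numbers([1, 2], 5): A raises ValueError, B returns (some 2, none)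
import Mathlib
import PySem

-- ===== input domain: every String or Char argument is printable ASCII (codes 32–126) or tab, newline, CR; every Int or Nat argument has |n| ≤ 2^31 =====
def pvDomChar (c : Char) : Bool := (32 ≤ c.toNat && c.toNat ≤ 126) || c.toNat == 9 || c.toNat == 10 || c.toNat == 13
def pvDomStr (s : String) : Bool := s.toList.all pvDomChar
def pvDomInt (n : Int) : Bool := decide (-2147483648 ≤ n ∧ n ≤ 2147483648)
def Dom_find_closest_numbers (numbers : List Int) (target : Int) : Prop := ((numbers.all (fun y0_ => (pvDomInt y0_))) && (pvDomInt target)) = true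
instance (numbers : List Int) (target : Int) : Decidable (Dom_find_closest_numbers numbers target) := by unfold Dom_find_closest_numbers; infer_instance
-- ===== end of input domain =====

-- B replaces A's sort + scan + list.index passes by one linear pass tracking the max of
-- values ≤ target and the min of values > target (objective: alternative single-pass algorithm).

-- ===== PORT A =====
-- the 'for number in sorted_numbers: if number > target: larger = number; break' loop
def pvFirstGreater (l : List Int) (target : Int) : Option Int :=
  match l with
  | [] => none
  | x :: xs => if x > target then some x else pvFirstGreater xs target

def find_closest_numbers (numbers : List Int) (target : Int) : Option Int × Option Int :=
  let sorted_numbers := PySem.List.sorted numbers (fun x => x)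
  let larger := pvFirstGreater sorted_numbers target
  match larger with
  | none => (none, none)  -- Python raises ValueError here (sorted_numbers.index(None)); excluded by Pre_
  | some lv =>
    match PySem.List.index? sorted_numbers lv with
    | none => (none, none)  -- unreachable: lv is an element of sorted_numbers
    | some i =>
      let smaller : Option Int :=
        if (i : Int) > 0 then PySem.List.pyGet? sorted_numbers ((i : Int) - 1) else none
      (smaller, some lv)

-- ===== PORT B =====
-- 'if smaller is None or x > smaller: smaller = x'
def pvMaxO (s : Option Int) (x : Int) : Option Int :=
  match s with
  | none => some x
  | some s' => if x > s' then some x else some s'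

-- 'if larger is None or x < larger: larger = x'
def pvMinO (s : Option Int) (x : Int) : Option Int :=
  match s with
  | none => some x
  | some s' => if x < s' then some x else some s'

def find_closest_numbers_alt (numbers : List Int) (target : Int) : Option Int × Option Int :=
  numbers.foldl
    (fun st x => if x > target then (st.1, pvMinO st.2 x) else (pvMaxO st.1 x, st.2))
    (none, none)

-- ===== PRECONDITION & SPEC =====
-- A raises ValueError (list.index(None)) exactly when no element exceeds target
def Pre_find_closest_numbers (numbers : List Int) (target : Int) : Prop :=
  ∃ x ∈ numbers, target < x
instance (numbers : List Int) (target : Int) : Decidable (Pre_find_closest_numbers numbers target) := by unfold Pre_find_closest_numbers; infer_instance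

def pvWitness_find_closest_numbers : List Int × Int := ([5, 1, 9, 3], 4)

-- When no element of numbers exceeds target (incl. the empty list) A raises ValueError; B returns (max of values ≤ target or none, none).
def Raises_find_closest_numbers (numbers : List Int) (target : Int) : Prop :=
  ∀ x ∈ numbers, x ≤ target
instance (numbers : List Int) (target : Int) : Decidable (Raises_find_closest_numbers numbers target) := by unfold Raises_find_closest_numbers; infer_instance

def pvRaiseWitness_find_closest_numbers : List Int × Int := ([1, 2], 5)
def pvRaiseWitnessOut_find_closest_numbers : Option Int × Option Int := (some 2, none)

def Spec_find_closest_numbers (numbers : List Int) (target : Int) (out : Option Int × Option Int) : Prop := out = find_closest_numbers_alt numbers target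
instance (numbers : List Int) (target : Int) (out : Option Int × Option Int) : Decidable (Spec_find_closest_numbers numbers target out) := by unfold Spec_find_closest_numbers; infer_instance

-- ===== CLAIM (what is proved, stated in full; the proofs are below) =====
def Claim_equal_find_closest_numbers : Prop := ∀ (numbers : List Int) (target : Int), Dom_find_closest_numbers numbers target → Pre_find_closest_numbers numbers target → Spec_find_closest_numbers numbers target (find_closest_numbers numbers target)

def Claim_raises_find_closest_numbers : Prop := (∀ (numbers : List Int) (target : Int), Dom_find_closest_numbers numbers target → Raises_find_closest_numbers numbers target → ¬ Pre_find_closest_numbers numbers target) ∧ (Dom_find_closest_numbers (pvRaiseWitness_find_closest_numbers.1) (pvRaiseWitness_find_closest_numbers.2) ∧ Raises_find_closest_numbers (pvRaiseWitness_find_closest_numbers.1) (pvRaiseWitness_find_closest_numbers.2) ∧ find_closest_numbers_alt (pvRaiseWitness_find_closest_numbers.1) (pvRaiseWitness_find_closest_numbers.2) = pvRaiseWitnessOut_find_closest_numbers)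

-- ===== LEMMAS AND PROOFS =====

-- B's paired fold splits into independent max/min folds over the two filters
theorem pvAlt_split (target : Int) (l : List Int) (s0 l0 : Option Int) :
    l.foldl (fun st x => if x > target then (st.1, pvMinO st.2 x) else (pvMaxO st.1 x, st.2)) (s0, l0)
      = ((l.filter (fun x => !decide (target < x))).foldl pvMaxO s0,
         (l.filter (fun x => decide (target < x))).foldl pvMinO l0) := by
  induction l generalizing s0 l0 with
  | nil => simp
  | cons x xs ih =>
    by_cases h : target < x <;> simp [List.foldl_cons, h, ih]

-- A's break loop is the head of the dropWhile
theorem pvFirstGreater_eq (l : List Int) (target : Int) :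
    pvFirstGreater l target = (l.dropWhile (fun x => !decide (target < x))).head? := by
  induction l with
  | nil => rfl
  | cons x xs ih =>
    by_cases h : target < x <;> simp [pvFirstGreater, h, ih]

theorem pvFoldMax_sorted (l : List Int) (a : Int) (h : List.Pairwise (· ≤ ·) (a :: l)) :
    l.foldl pvMaxO (some a) = some (l.getLastD a) := by
  induction l generalizing a with
  | nil => rfl
  | cons y ys ih =>
    rcases List.pairwise_cons.mp h with ⟨hay, hys⟩
    have hy : a ≤ y := hay y (by simp)
    have hstep : pvMaxO (some a) y = some y := by
      simp only [pvMaxO]; split_ifs with hc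
      · rfl
      · simp only [Option.some.injEq]; omega
    rw [List.foldl_cons, hstep, ih y hys, List.getLastD_cons]

theorem pvFoldMin_const (l : List Int) (a : Int) (h : ∀ y ∈ l, a ≤ y) :
    l.foldl pvMinO (some a) = some a := by
  induction l with
  | nil => rfl
  | cons y ys ih =>
    have hstep : pvMinO (some a) y = some a := by
      have := h y (by simp)
      simp only [pvMinO]; split_ifs with hc
      · simp only [Option.some.injEq]; omega
      · rfl
    rw [List.foldl_cons, hstep]
    exact ih (fun y hy => h y (by simp [hy]))

theorem pvMaxO_eq (o : Option Int) (x : Int) : pvMaxO o x = some (o.elim x (fun s => max s x)) := by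
  rcases o with _ | s
  · rfl
  · simp only [pvMaxO, Option.elim]
    split_ifs <;> simp only [Option.some.injEq] <;> omega

theorem pvMinO_eq (o : Option Int) (x : Int) : pvMinO o x = some (o.elim x (fun s => min s x)) := by
  rcases o with _ | s
  · rfl
  · simp only [pvMinO, Option.elim]
    split_ifs <;> simp only [Option.some.injEq] <;> omega

@[reducible] def pvMaxO_rcomm : RightCommutative pvMaxO :=
  ⟨by intro o x y
      rcases o with _ | s <;>
        simp only [pvMaxO_eq, Option.elim, Option.some.injEq] <;> omega⟩

@[reducible] def pvMinO_rcomm : RightCommutative pvMinO :=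
  ⟨by intro o x y
      rcases o with _ | s <;>
        simp only [pvMinO_eq, Option.elim, Option.some.injEq] <;> omega⟩

theorem pvHead_dropWhile_false (p : Int → Bool) (l : List Int) (x : Int)
    (h : (l.dropWhile p).head? = some x) : p x = false := by
  induction l with
  | nil => simp at h
  | cons y ys ih =>
    rw [List.dropWhile_cons] at h
    by_cases hpy : p y = true
    · rw [if_pos hpy] at h; exact ih h
    · rw [if_neg hpy] at h
      simp at h
      subst h
      simpa using hpy

-- ===== VERDICT (by name: the statement is the Claim_ definition above) =====
theorem find_closest_numbers_spec : Claim_equal_find_closest_numbers := by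
  intro numbers target _ hpre
  unfold Spec_find_closest_numbers
  set p : Int → Bool := fun x => !decide (target < x) with hp
  set q : Int → Bool := fun x => decide (target < x) with hq
  set L := PySem.List.sorted numbers (fun x => x) with hL
  have hperm : L.Perm numbers := PySem.List.sorted_perm numbers (fun x => x) false
  have hpw : L.Pairwise (· ≤ ·) := PySem.List.sorted_pairwise numbers (fun x => x)
  set l₁ := L.takeWhile p with hl₁
  set l₂ := L.dropWhile p with hl₂
  have hsplit : l₁ ++ l₂ = L := List.takeWhile_append_dropWhile
  -- l₂ is nonempty: the element > target is in L but not in l₁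
  obtain ⟨w, hwmem, hwgt⟩ := hpre
  have hwL : w ∈ L := hperm.mem_iff.mpr hwmem
  have hne : l₂ ≠ [] := by
    intro hnil
    rw [hnil, List.append_nil] at hsplit
    rw [← hsplit] at hwL
    have := List.mem_takeWhile_imp hwL
    simp [hp] at this
    omega
  obtain ⟨m, rest, hml⟩ : ∃ m rest, l₂ = m :: rest := by
    cases hl : l₂ with
    | nil => exact absurd hl hne
    | cons a b => exact ⟨a, b, rfl⟩
  have hmgt : target < m := by
    have := pvHead_dropWhile_false p L m (by rw [← hl₂, hml]; rfl)
    simp [hp] at this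
    exact this
  have hl₁le : ∀ y ∈ l₁, y ≤ target := by
    intro y hy
    have := List.mem_takeWhile_imp hy
    simp [hp] at this
    omega
  have hl₂pw : l₂.Pairwise (· ≤ ·) := hpw.sublist (List.dropWhile_sublist p)
  have hrest : ∀ y ∈ rest, m ≤ y := by
    have := hml ▸ hl₂pw
    exact (List.pairwise_cons.mp this).1
  have hl₂gt : ∀ y ∈ l₂, target < y := by
    intro y hy
    rw [hml] at hy
    rcases List.mem_cons.mp hy with h | h
    · omega
    · have := hrest y h; omega
  -- filters of L are exactly l₁ and l₂
  have hfp : L.filter p = l₁ := by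
    rw [← hsplit, List.filter_append]
    rw [List.filter_eq_self.mpr (fun y hy => List.mem_takeWhile_imp (p := p) (l := L) (hl₁ ▸ hy)),
        List.filter_eq_nil_iff.mpr (fun y hy => by have := hl₂gt y hy; simp [hp]; omega),
        List.append_nil]
  have hfq : L.filter q = l₂ := by
    rw [← hsplit, List.filter_append]
    rw [List.filter_eq_nil_iff.mpr (fun y hy => by have := hl₁le y hy; simp [hq]; omega),
        List.filter_eq_self.mpr (fun y hy => by have := hl₂gt y hy; simp [hq]; omega),
        List.nil_append]
  -- B's value
  have hB : find_closest_numbers_alt numbers target = (l₁.getLast?, some m) := by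
    unfold find_closest_numbers_alt
    rw [pvAlt_split]
    have hpermp : (numbers.filter p).Perm l₁ := hfp ▸ (hperm.symm.filter p)
    have hpermq : (numbers.filter q).Perm l₂ := hfq ▸ (hperm.symm.filter q)
    rw [@List.Perm.foldl_eq _ _ pvMaxO _ _ pvMaxO_rcomm hpermp,
        @List.Perm.foldl_eq _ _ pvMinO _ _ pvMinO_rcomm hpermq]
    congr 1
    · cases hc : l₁ with
      | nil => rfl
      | cons a t =>
        have : l₁.Pairwise (· ≤ ·) := hpw.sublist (hl₁ ▸ List.takeWhile_sublist p)
        rw [List.foldl_cons]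
        have hstep : pvMaxO none a = some a := rfl
        rw [hstep, pvFoldMax_sorted t a (hc ▸ this), List.getLast?_cons,
            List.getLastD_eq_getLast?]
    · rw [hml, List.foldl_cons]
      exact pvFoldMin_const rest m hrest
  -- A's value
  have hfg : pvFirstGreater L target = some m := by
    rw [pvFirstGreater_eq, ← hp, ← hl₂, hml]; rfl
  have hidx : PySem.List.index? L m = some l₁.length := by
    rw [PySem.List.index?_eq_some_iff]
    exact ⟨l₁, rest, by rw [← hsplit, hml], rfl,
           fun hmem => absurd hmgt (by have := hl₁le m hmem; omega)⟩
  have hA : find_closest_numbers numbers target =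
      ((if ((l₁.length : Int) > 0) then PySem.List.pyGet? L ((l₁.length : Int) - 1) else none),
       some m) := by
    simp only [find_closest_numbers, ← hL, hfg, hidx]
  rw [hA, hB]
  cases hc : l₁ with
  | nil => simp
  | cons a t =>
    rw [← hc]
    have hl₁ne : l₁ ≠ [] := by simp [hc]
    have hpos : ((l₁.length : Int) > 0) := by rw [hc]; simp
    rw [if_pos hpos]
    have hdecomp : L = l₁.dropLast ++ l₁.getLast hl₁ne :: l₂ := by
      conv_lhs => rw [← hsplit, ← List.dropLast_append_getLast (l := l₁) hl₁ne]
      rw [List.append_assoc]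
      rfl
    have hlen : ((l₁.length : Int) - 1) = ((l₁.dropLast.length : Nat) : Int) := by
      rw [List.length_dropLast]
      have : 1 ≤ l₁.length := by rw [hc]; simp
      omega
    rw [hlen, hdecomp, PySem.List.pyGet?_append_length]
    exact congrArg (fun o => (o, some m)) (List.getLast?_eq_some_getLast hl₁ne).symm

@[simp] theorem find_closest_numbers_raises : Claim_raises_find_closest_numbers := by
  unfold Claim_raises_find_closest_numbers
  refine ⟨?_, by decide⟩
  intro numbers target _ hall ⟨x, hx, hgt⟩
  have := hall x hx
  omega
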